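-- pv_equiv track=rewrite | github.com/ayoubc/competitive-programming | online_judges/codechef/THOUSES.py | solve
-- ===== SOURCE A (Python) =====
-- MOD = 1000000007
--
-- def solve(tree, n, x):
--     values = [0] * n
--
--     def dfs(s, e):
--         values[s] = 1
--         tmp = []
--         for u in tree[s]:
--             if u == e:
--                 continue
--
--             dfs(u, s)
--             tmp.append(values[u])
--
--         tmp.sort(reverse=True)
--         for i in range(len(tmp)):
--             values[s] += (i+1) * tmp[i]
--
--     dfs(0, -1)
--     return (values[0] * x) % MOD
-- ===== SOURCE B (Python) =====
-- MOD = 1000000007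
--
--
-- def solve(tree, n, x):
--     values = [0] * n
--     # frames: (node, parent, next-child-index, collected child values)
--     stack = [(0, -1, 0, [])]
--     while stack:
--         s, e, i, tmp = stack[-1]
--         if i == 0:
--             values[s] = 1
--         if i < len(tree[s]):
--             stack[-1] = (s, e, i + 1, tmp)
--             u = tree[s][i]
--             if u != e:
--                 stack.append((u, s, 0, []))
--         else:
--             tmp = sorted(tmp, reverse=True)
--             for j in range(len(tmp)):
--                 values[s] += (j + 1) * tmp[j]
--             stack.pop()
--             if stack:
--                 s2, e2, i2, tmp2 = stack[-1]
--                 stack[-1] = (s2, e2, i2, tmp2 + [values[s]])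
--     return values[0] * x % MOD
-- ===== Notes on version B (the rewrite author's own statement) =====
-- stated objective: alternative
-- what changed: the recursive closure-mutating DFS is replaced by an iterative two-phase (enter/exit) post-order traversal over an explicit stack of (node, parent, next-child-index, collected-child-values) frames
-- outside the precondition, e.g. on solve([[1], [-2]], 2, 1): A returns 3, B returns 3; on solve([[-1, 1, 2], [2], [-3], [], [-35]], 5, 1): A returns 14, B returns 14; on solve([[1, -1, 0], [], [], []], 4, 1): A returns 10, B returns 10
import Mathlib
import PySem

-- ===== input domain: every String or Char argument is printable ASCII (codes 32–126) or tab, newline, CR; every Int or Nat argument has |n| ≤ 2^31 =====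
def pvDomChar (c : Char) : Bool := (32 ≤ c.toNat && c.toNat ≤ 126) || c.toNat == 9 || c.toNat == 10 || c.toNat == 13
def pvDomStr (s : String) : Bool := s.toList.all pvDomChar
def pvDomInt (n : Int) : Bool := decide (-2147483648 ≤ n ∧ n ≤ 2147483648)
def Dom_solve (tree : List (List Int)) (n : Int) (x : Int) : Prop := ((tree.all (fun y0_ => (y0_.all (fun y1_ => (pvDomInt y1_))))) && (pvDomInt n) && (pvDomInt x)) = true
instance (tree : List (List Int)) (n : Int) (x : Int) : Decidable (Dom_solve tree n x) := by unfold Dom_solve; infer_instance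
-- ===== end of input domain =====

-- B replaces A's recursive closure-mutating DFS by an iterative two-phase (enter/exit) post-order
-- traversal over an explicit stack of (node, parent, next-child-index, collected-values) frames:
-- an alternative decomposition of the same cost.

-- ===== PORT A =====
def pvMOD : Int := 1000000007

-- literal port of A's nested `dfs(s, e)` (the mutated `values` list threaded as state; fuel makes the recursion total)
def dfsA (tree : List (List Int)) : Nat → Int → Int → List Int → List Int
  | 0, _, _, values => values
  | fuel+1, s, e, values =>
    -- values[s] = 1
    let values := PySem.List.pySetD values s 1
    -- for u in tree[s]: if u == e: continue; dfs(u, s); tmp.append(values[u])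
    let st := (((PySem.List.pyGet? tree s).getD []).foldl
      (fun (st : List Int × List Int) u =>
        if u = e then st
        else
          let values := dfsA tree fuel u s st.1
          (values, st.2 ++ [(PySem.List.pyGet? values u).getD 0]))
      (values, ([] : List Int)))
    -- tmp.sort(reverse=True)
    let tmp := PySem.List.sorted st.2 (fun v => v) true
    -- for i in range(len(tmp)): values[s] += (i+1) * tmp[i]
    (PySem.List.pyRange 0 (tmp.length : Int) 1).foldl
      (fun values i =>
        PySem.List.pySetD values s (PySem.List.pyGetD values s 0 + (i + 1) * PySem.List.pyGetD tmp i 0))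
      st.1

def solve (tree : List (List Int)) (n : Int) (x : Int) : Int :=
  let values := List.replicate n.toNat 0
  let values := dfsA tree (2 * tree.length + 3) 0 (-1) values
  PySem.Int.mod ((PySem.List.pyGet? values 0).getD 0 * x) pvMOD

-- ===== PORT B =====
-- one iteration of B's `while stack:` loop; frames are (node, parent, next-child-index, collected child values)
def stepB (tree : List (List Int)) :
    List (Int × Int × Int × List Int) × List Int → List (Int × Int × Int × List Int) × List Int
  | ([], values) => ([], values)
  | ((s, e, i, tmp) :: rest, values) =>
    -- if i == 0: values[s] = 1
    let values := if i = 0 then PySem.List.pySetD values s 1 else values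
    let row := (PySem.List.pyGet? tree s).getD []
    if i < (row.length : Int) then
      -- stack[-1] = (s, e, i + 1, tmp); u = tree[s][i]; if u != e: stack.append((u, s, 0, []))
      let u := PySem.List.pyGetD row i 0
      let st := (s, e, i + 1, tmp) :: rest
      if u ≠ e then ((u, s, 0, ([] : List Int)) :: st, values) else (st, values)
    else
      -- tmp = sorted(tmp, reverse=True); for j in range(len(tmp)): values[s] += (j+1)*tmp[j]
      let tmpS := PySem.List.sorted tmp (fun v => v) true
      let values := (PySem.List.pyRange 0 (tmpS.length : Int) 1).foldl
        (fun values j => PySem.List.pySetD values s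
          (PySem.List.pyGetD values s 0 + (j + 1) * PySem.List.pyGetD tmpS j 0)) values
      -- stack.pop(); if stack: append values[s] to the collected values of the new top frame
      match rest with
      | [] => ([], values)
      | (s2, e2, i2, tmp2) :: rest2 =>
        ((s2, e2, i2, tmp2 ++ [(PySem.List.pyGet? values s).getD 0]) :: rest2, values)

-- B's `while stack:` loop (the fuel only makes the loop total; it stops by itself on the empty stack)
def runB (tree : List (List Int)) :
    Nat → List (Int × Int × Int × List Int) × List Int → List (Int × Int × Int × List Int) × List Int
  | 0, st => st
  | _ + 1, ([], values) => ([], values)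
  | k + 1, (f :: stk, values) => runB tree k (stepB tree (f :: stk, values))

-- crude upper bound on the number of loop iterations on inputs satisfying Pre_ (a totalization guard,
-- not part of B's Python, which has no bound)
def pvFuelB (tree : List (List Int)) : Nat := ((tree.map List.length).sum + 2) ^ (2 * tree.length + 4)

def solve_alt (tree : List (List Int)) (n : Int) (x : Int) : Int :=
  let values := List.replicate n.toNat (0 : Int)
  let st := runB tree (pvFuelB tree) ([(0, -1, 0, ([] : List Int))], values)
  PySem.Int.mod ((PySem.List.pyGet? st.2 0).getD 0 * x) pvMOD

-- ===== PRECONDITION & SPEC =====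
-- BFS depth table of the graph described by `tree`, from vertex 0: layer k+1 marks the
-- unmarked vertices adjacent to a layer-k vertex (a plain graph property, used only by Pre_)
def pvDistT (tree : List (List Int)) : Nat → List (Option Nat)
  | 0 => (List.range tree.length).map (fun j => if j = 0 then some 0 else none)
  | k + 1 =>
    let D := pvDistT tree k
    (List.range tree.length).map (fun j =>
      match D.getD j none with
      | some d => some d
      | none =>
        if (List.range tree.length).any (fun c =>
            D.getD c none == some k && decide ((j : Int) ∈ tree.getD c [])) then
          some (k + 1)
        else none)

-- the first depth-(d-1) in-neighbour of vertex s in depth table D (its parent when `tree` is a tree)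
def pvParD (tree : List (List Int)) (D : List (Option Nat)) (s d : Nat) : Nat :=
  List.findIdx (fun c => decide (D.getD c none = some (d - 1) ∧ (s : Int) ∈ tree.getD c []))
    (List.range tree.length)

-- `tree` describes a tree rooted at vertex 0 (self-loops tolerated): each vertex reachable at BFS
-- depth d lists, besides in-range depth-(d+1) children, either only self-loops, or its unique
-- depth-(d-1) in-neighbour (its parent) and -- at the root -- the dummy parent -1 (which A's root
-- call dfs(0, -1) skips).
def pvTreeOKb (tree : List (List Int)) : Bool :=
  let D := pvDistT tree tree.length
  (List.range tree.length).all fun s =>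
    match D.getD s none with
    | none => true
    | some d =>
      -- self-mode row: every entry is a depth-(d+1) child or a self-loop (safe under any caller)
      ((tree.getD s []).all fun u =>
        decide (0 ≤ u ∧ u < (tree.length : Int) ∧ D.getD u.toNat none = some (d + 1))
        || decide (u = (s : Int)))
      ||
      -- parent-mode row: children, the root's dummy parent -1, or the unique parent
      (((tree.getD s []).all fun u =>
        decide (0 ≤ u ∧ u < (tree.length : Int) ∧ D.getD u.toNat none = some (d + 1))
        || decide (d = 0 ∧ u = -1)
        || decide (1 ≤ d ∧ 0 ≤ u ∧ u < (tree.length : Int) ∧ D.getD u.toNat none = some (d - 1) ∧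
            (s : Int) ∈ tree.getD u.toNat []))
      &&
      (decide (d = 0) ||
        ((List.range tree.length).all fun c =>
          !(decide (D.getD c none = some (d - 1) ∧ (s : Int) ∈ tree.getD c []))
          || decide (c = pvParD tree D s d))))

-- every reachable vertex is a legal index into the values list of length n
def pvBelowb (tree : List (List Int)) (n : Int) : Bool :=
  let D := pvDistT tree tree.length
  (List.range tree.length).all fun s => (D.getD s none).isNone || decide ((s : Int) < n)

-- Pre_ restricts to the problem's domain: a tree rooted at vertex 0 (arbitrary vertex labels),
-- with every reachable vertex below n.  Outside it A raises (IndexError on an out-of-range vertex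
-- or values index, RecursionError on a cycle) or, on some degenerate non-tree inputs, still
-- terminates — B then returns the same value (it mirrors A's traversal step for step; see the
-- cites), but the fuel-bounded termination argument below does not cover them.
def Pre_solve (tree : List (List Int)) (n : Int) (x : Int) : Prop :=
  1 ≤ tree.length ∧ pvTreeOKb tree = true ∧ pvBelowb tree n = true

instance (tree : List (List Int)) (n : Int) (x : Int) : Decidable (Pre_solve tree n x) := by
  unfold Pre_solve; infer_instance

def pvWitness_solve : List (List Int) × Int × Int := ([[2], [2], [0, 1]], 3, 1)

def Spec_solve (tree : List (List Int)) (n : Int) (x : Int) (out : Int) : Prop := out = solve_alt tree n x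
instance (tree : List (List Int)) (n : Int) (x : Int) (out : Int) : Decidable (Spec_solve tree n x out) := by
  unfold Spec_solve; infer_instance

-- ===== CLAIM (what is proved, stated in full; the proofs are below) =====
def Claim_equal_solve : Prop := ∀ (tree : List (List Int)) (n : Int) (x : Int),
  Dom_solve tree n x → Pre_solve tree n x → Spec_solve tree n x (solve tree n x)

-- ===== LEMMAS AND PROOFS =====

-- the BFS depth of a vertex (the stabilized depth table read at s; proof-side shorthand)
def pvDist (tree : List (List Int)) (s : Nat) : Option Nat :=
  (pvDistT tree tree.length).getD s none

-- reading a list at a nonnegative Python index is List.getD at its toNat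
theorem pv_pyGet_nonneg {α : Type} (xs : List α) (i : Int) (hi : 0 ≤ i) (d : α) :
    (PySem.List.pyGet? xs i).getD d = xs.getD i.toNat d := by
  rw [PySem.List.pyGet?_of_nonneg xs hi]
  exact (List.getD_eq_getElem?_getD).symm

theorem pv_runB_nil (tree : List (List Int)) (k : Nat) (v : List Int) :
    runB tree k ([], v) = ([], v) := by
  cases k <;> rfl

theorem pv_runB_succ_cons (tree : List (List Int)) (k : Nat) (f : Int × Int × Int × List Int)
    (stk : List (Int × Int × Int × List Int)) (v : List Int) :
    runB tree (k + 1) (f :: stk, v) = runB tree k (stepB tree (f :: stk, v)) := rfl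

theorem pv_runB_add (tree : List (List Int)) :
    ∀ (a b : Nat) (st : List (Int × Int × Int × List Int) × List Int),
    runB tree (a + b) st = runB tree b (runB tree a st) := by
  intro a
  induction a with
  | zero => intro b st; rw [Nat.zero_add]; rfl
  | succ a ih =>
    intro b st
    obtain ⟨stk, v⟩ := st
    cases stk with
    | nil => simp [pv_runB_nil]
    | cons f S =>
      rw [show a + 1 + b = (a + b) + 1 by omega, pv_runB_succ_cons, pv_runB_succ_cons, ih]

theorem pv_map_range_getD {α : Type} (N : Nat) (f : Nat → Option α) (j : Nat) :
    ((List.range N).map f).getD j none = if j < N then f j else none := by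
  by_cases h : j < N <;>
    simp [List.getD_eq_getElem?_getD, List.getElem?_map, List.getElem?_range, h]

theorem pv_distT_le (tree : List (List Int)) :
    ∀ (k j d : Nat), (pvDistT tree k).getD j none = some d → d ≤ k := by
  intro k
  induction k with
  | zero =>
    intro j d h
    rw [show pvDistT tree 0 = (List.range tree.length).map (fun j => if j = 0 then some 0 else none) from rfl,
      pv_map_range_getD] at h
    by_cases h1 : j < tree.length
    · rw [if_pos h1] at h
      by_cases h2 : j = 0
      · rw [if_pos h2] at h; simp only [Option.some.injEq] at h; omega
      · rw [if_neg h2] at h; exact absurd h (by simp)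
    · rw [if_neg h1] at h; exact absurd h (by simp)
  | succ k ih =>
    intro j d h
    rw [show pvDistT tree (k + 1) = (List.range tree.length).map (fun j =>
        match (pvDistT tree k).getD j none with
        | some d => some d
        | none =>
          if (List.range tree.length).any (fun c =>
              (pvDistT tree k).getD c none == some k && decide ((j : Int) ∈ tree.getD c [])) then
            some (k + 1)
          else none) from rfl, pv_map_range_getD] at h
    by_cases h1 : j < tree.length
    · rw [if_pos h1] at h
      cases hjk : (pvDistT tree k).getD j none with
      | some d' =>
        rw [hjk] at h
        simp only [Option.some.injEq] at h
        have := ih j d' hjk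
        omega
      | none =>
        rw [hjk] at h
        simp only [] at h
        split_ifs at h
        simp only [Option.some.injEq] at h
        omega
    · rw [if_neg h1] at h; exact absurd h (by simp)

theorem pv_dist_le (tree : List (List Int)) (s d : Nat) (h : pvDist tree s = some d) :
    d ≤ tree.length :=
  pv_distT_le tree tree.length s d h

theorem pv_distT_zero (tree : List (List Int)) (hN : 1 ≤ tree.length) :
    ∀ k : Nat, (pvDistT tree k).getD 0 none = some 0 := by
  have h0 : 0 < tree.length := hN
  intro k
  induction k with
  | zero =>
    rw [show pvDistT tree 0 = (List.range tree.length).map (fun j => if j = 0 then some 0 else none) from rfl,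
      pv_map_range_getD, if_pos h0]
    rfl
  | succ k ih =>
    rw [show pvDistT tree (k + 1) = (List.range tree.length).map (fun j =>
        match (pvDistT tree k).getD j none with
        | some d => some d
        | none =>
          if (List.range tree.length).any (fun c =>
              (pvDistT tree k).getD c none == some k && decide ((j : Int) ∈ tree.getD c [])) then
            some (k + 1)
          else none) from rfl, pv_map_range_getD, if_pos h0, ih]

theorem pv_dist_zero (tree : List (List Int)) (hN : 1 ≤ tree.length) :
    pvDist tree 0 = some 0 :=
  pv_distT_zero tree hN tree.length

theorem pv_row_len (tree : List (List Int)) (s : Int) :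
    ((PySem.List.pyGet? tree s).getD []).length ≤ (tree.map List.length).sum := by
  cases h : PySem.List.pyGet? tree s with
  | none => simp
  | some l =>
    have hmem : l ∈ tree := PySem.List.mem_of_pyGet?_eq_some tree h
    have hml : l.length ∈ tree.map List.length := List.mem_map_of_mem hmem
    simpa using List.single_le_sum (fun x _ => Nat.zero_le x) _ hml

-- ----- proof-side helpers: call invariants, step counts, the machine's exit state -----

-- the call dfs(s, e) is a proper call of A's recursion: s reachable at depth d, e its parent (-1 at the root)
def pvCallOK (tree : List (List Int)) (s e : Int) (d : Nat) : Prop :=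
  0 ≤ s ∧ s < (tree.length : Int) ∧ pvDist tree s.toNat = some d ∧
  ((∀ u ∈ tree.getD s.toNat [],
      (0 ≤ u ∧ u < (tree.length : Int) ∧ pvDist tree u.toNat = some (d + 1)) ∨ u = s) ∨
   ((d = 0 ∧ e = -1) ∨
    (1 ≤ d ∧ 0 ≤ e ∧ e < (tree.length : Int) ∧ pvDist tree e.toNat = some (d - 1) ∧
     s ∈ tree.getD e.toNat [])))

-- unpacking the boolean tree check: each reachable row is self-mode or parent-mode (with uniqueness)
theorem pv_treeOKb_modes (tree : List (List Int)) (h : pvTreeOKb tree = true)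
    (s : Nat) (hs : s < tree.length) (d : Nat) (hd : pvDist tree s = some d) :
    (∀ u ∈ tree.getD s [],
       (0 ≤ u ∧ u < (tree.length : Int) ∧ pvDist tree u.toNat = some (d + 1)) ∨ u = (s : Int)) ∨
    ((∀ u ∈ tree.getD s [],
       (0 ≤ u ∧ u < (tree.length : Int) ∧ pvDist tree u.toNat = some (d + 1)) ∨
       (d = 0 ∧ u = -1) ∨
       (1 ≤ d ∧ 0 ≤ u ∧ u < (tree.length : Int) ∧ pvDist tree u.toNat = some (d - 1) ∧
        (s : Int) ∈ tree.getD u.toNat [])) ∧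
     (1 ≤ d → ∀ c < tree.length, pvDist tree c = some (d - 1) → (s : Int) ∈ tree.getD c [] →
        c = pvParD tree (pvDistT tree tree.length) s d)) := by
  have hs' := List.all_eq_true.mp h s (List.mem_range.mpr hs)
  rw [show (pvDistT tree tree.length).getD s none = some d from hd] at hs'
  simp only [Bool.or_eq_true, Bool.and_eq_true] at hs'
  rcases hs' with hself | ⟨hpar, huniq⟩
  · left
    intro u hu
    have hrow := List.all_eq_true.mp hself u hu
    simp only [Bool.or_eq_true, decide_eq_true_eq] at hrow
    exact hrow
  · right
    constructor
    · intro u hu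
      have hrow := List.all_eq_true.mp hpar u hu
      simp only [Bool.or_eq_true, decide_eq_true_eq] at hrow
      rcases hrow with (h1 | h2) | h3
      · exact Or.inl h1
      · exact Or.inr (Or.inl h2)
      · exact Or.inr (Or.inr h3)
    · intro h1d c hc hcd hcm
      rcases huniq with h0 | hall
      · simp only [decide_eq_true_eq] at h0
        omega
      · have hcc := List.all_eq_true.mp hall c (List.mem_range.mpr hc)
        simp only [Bool.or_eq_true, Bool.not_eq_true', decide_eq_true_eq,
          decide_eq_false_iff_not] at hcc
        rcases hcc with hno | hyes
        · exact absurd ⟨hcd, hcm⟩ hno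
        · exact hyes

-- each entry of a properly called vertex's list is skipped (parent), a self-call, or a proper child call
theorem pv_callStep (tree : List (List Int)) (hT : pvTreeOKb tree = true) (s e : Int) (d : Nat)
    (hc : pvCallOK tree s e d) :
    ∀ u ∈ (PySem.List.pyGet? tree s).getD [],
      u = e ∨ (u = s ∧ pvCallOK tree s s d) ∨ pvCallOK tree u s (d + 1) := by
  obtain ⟨hs0, hsN, hsd, hmode⟩ := hc
  intro u hu
  have hsNat : s.toNat < tree.length := by omega
  have hcast : ((s.toNat : Nat) : Int) = s := Int.toNat_of_nonneg hs0
  rw [pv_pyGet_nonneg tree s hs0] at hu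
  have hchildOK : ∀ v : Int, 0 ≤ v → v < (tree.length : Int) → pvDist tree v.toNat = some (d + 1) →
      v ∈ tree.getD s.toNat [] → pvCallOK tree v s (d + 1) := by
    intro v hv0 hvN hvd hvm
    have hvNat : v.toNat < tree.length := by omega
    rcases pv_treeOKb_modes tree hT v.toNat hvNat (d + 1) hvd with hselfv | ⟨hparv, huniqv⟩
    · refine ⟨hv0, hvN, hvd, Or.inl ?_⟩
      intro w hw
      rcases hselfv w hw with h1 | h2
      · exact Or.inl h1
      · right
        rw [Int.toNat_of_nonneg hv0] at h2
        exact h2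
    · exact ⟨hv0, hvN, hvd, Or.inr (Or.inr ⟨by omega, hs0, hsN,
        by rw [show d + 1 - 1 = d from rfl]; exact hsd, hvm⟩)⟩
  have hmodes := pv_treeOKb_modes tree hT s.toNat hsNat d hsd
  rw [hcast] at hmodes
  rcases hmodes with hself | ⟨hpar, huniq⟩
  · rcases hself u hu with ⟨hu0, huN, hud⟩ | hus
    · exact Or.inr (Or.inr (hchildOK u hu0 huN hud hu))
    · exact Or.inr (Or.inl ⟨hus, hs0, hsN, hsd, Or.inl hself⟩)
  · rcases hpar u hu with ⟨hu0, huN, hud⟩ | ⟨hd0, hue⟩ | ⟨hd1, hu0, huN, hud, hback⟩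
    · exact Or.inr (Or.inr (hchildOK u hu0 huN hud hu))
    · subst hue
      rcases hmode with hselfc | (⟨-, he⟩ | ⟨hd1, -, -, -, -⟩)
      · rcases hselfc (-1) hu with ⟨h1, -, -⟩ | h2
        · omega
        · omega
      · exact Or.inl he.symm
      · omega
    · -- u is a smaller-depth entry: by uniqueness of the parent it equals e
      rcases hmode with hselfc | (⟨hd0, -⟩ | ⟨-, he0, heN, hed, hmem⟩)
      · rcases hselfc u hu with ⟨-, -, hud2⟩ | hus
        · rw [hud] at hud2
          simp only [Option.some.injEq] at hud2
          omega
        · have : u.toNat = s.toNat := by omega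
          rw [this, hsd] at hud
          simp only [Option.some.injEq] at hud
          omega
      · omega
      · left
        have h1 := huniq hd1 u.toNat (by omega) hud hback
        have h2 := huniq hd1 e.toNat (by omega) hed hmem
        omega

-- iteration count of B's loop attributable to the call dfs(s, e) (mirrors dfsA's recursion; proof-side only)
def pvStepsA (tree : List (List Int)) : Nat → Int → Int → Nat
  | 0, _, _ => 0
  | fuel + 1, s, e =>
    1 + ((PySem.List.pyGet? tree s).getD []).foldl
      (fun acc u => acc + 1 + (if u = e then 0 else pvStepsA tree fuel u s)) 0

theorem pv_foldl_shift (h : Int → Nat) :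
    ∀ (l : List Int) (a : Nat),
    l.foldl (fun acc u => acc + 1 + h u) a = a + l.foldl (fun acc u => acc + 1 + h u) 0 := by
  intro l
  induction l with
  | nil => intro a; simp
  | cons u t ih =>
    intro a
    rw [List.foldl_cons, List.foldl_cons, ih (a + 1 + h u), ih (0 + 1 + h u)]
    omega

theorem pv_steps_le (tree : List (List Int)) :
    ∀ (f : Nat) (s e : Int),
    pvStepsA tree f s e ≤ ((tree.map List.length).sum + 2) ^ (f + 1) := by
  intro f
  induction f with
  | zero => intro s e; exact Nat.zero_le _
  | succ f ih =>
    intro s e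
    set S := (tree.map List.length).sum with hS
    have haux : ∀ l : List Int,
        l.foldl (fun acc u => acc + 1 + (if u = e then 0 else pvStepsA tree f u s)) 0
          ≤ l.length * (1 + (S + 2) ^ (f + 1)) := by
      intro l
      induction l with
      | nil => simp
      | cons u t iht =>
        rw [List.foldl_cons, pv_foldl_shift]
        have hcu : (if u = e then 0 else pvStepsA tree f u s) ≤ (S + 2) ^ (f + 1) := by
          split_ifs
          · exact Nat.zero_le _
          · exact ih u s
        simp only [List.length_cons]
        calc 0 + 1 + (if u = e then 0 else pvStepsA tree f u s) +
              t.foldl (fun acc u => acc + 1 + (if u = e then 0 else pvStepsA tree f u s)) 0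
            ≤ (1 + (S + 2) ^ (f + 1)) + t.length * (1 + (S + 2) ^ (f + 1)) := by omega
          _ = (t.length + 1) * (1 + (S + 2) ^ (f + 1)) := by ring
    have hrow := pv_row_len tree s
    have hX : S + 2 ≤ (S + 2) ^ (f + 1) := Nat.le_self_pow (by omega) _
    have hfold := haux ((PySem.List.pyGet? tree s).getD [])
    show 1 + _ ≤ _
    rw [show (S + 2) ^ (f + 1 + 1) = (S + 2) ^ (f + 1) * (S + 2) from pow_succ _ _]
    set X := (S + 2) ^ (f + 1) with hXdef
    set L := ((PySem.List.pyGet? tree s).getD []).length with hL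
    have h1 : 1 + L * (1 + X) ≤ X * (S + 2) := by
      have h2 : L * (1 + X) ≤ S * (1 + X) := Nat.mul_le_mul_right _ hrow
      have h3 : X * (S + 2) = S * X + 2 * X := by ring
      have h4 : S * (1 + X) = S + S * X := by ring
      omega
    omega

def pvPush (v : Int) : List (Int × Int × Int × List Int) → List (Int × Int × Int × List Int)
  | [] => []
  | (s2, e2, i2, t2) :: r => (s2, e2, i2, t2 ++ [v]) :: r

-- the values list after the exit phase of a frame for node s with collected values tmp
def pvExitVals (s : Int) (vals tmp : List Int) : List Int :=
  let tmpS := PySem.List.sorted tmp (fun v => v) true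
  (PySem.List.pyRange 0 (tmpS.length : Int) 1).foldl
    (fun values j => PySem.List.pySetD values s
      (PySem.List.pyGetD values s 0 + (j + 1) * PySem.List.pyGetD tmpS j 0)) vals

-- A's child-loop body as a function (st = (values, tmp))
def pvF (tree : List (List Int)) (fuel : Nat) (s e : Int) :
    List Int × List Int → Int → List Int × List Int :=
  fun st u =>
    if u = e then st
    else
      let values := dfsA tree fuel u s st.1
      (values, st.2 ++ [(PySem.List.pyGet? values u).getD 0])

theorem pv_dfsA_succ (tree : List (List Int)) (fuel : Nat) (s e : Int) (values : List Int) :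
    dfsA tree (fuel + 1) s e values =
      pvExitVals s
        ((((PySem.List.pyGet? tree s).getD []).foldl (pvF tree fuel s e)
            (PySem.List.pySetD values s 1, ([] : List Int)))).1
        ((((PySem.List.pyGet? tree s).getD []).foldl (pvF tree fuel s e)
            (PySem.List.pySetD values s 1, ([] : List Int)))).2 := rfl

-- the single-step characterizations of B's loop body
theorem pv_stepB_push (tree : List (List Int)) (s e i : Int) (tmp : List Int)
    (rest : List (Int × Int × Int × List Int)) (values : List Int)
    (h0 : ¬ i = 0) (hlt : i < (((PySem.List.pyGet? tree s).getD []).length : Int))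
    (hne : ¬ PySem.List.pyGetD ((PySem.List.pyGet? tree s).getD []) i 0 = e) :
    stepB tree ((s, e, i, tmp) :: rest, values)
      = ((PySem.List.pyGetD ((PySem.List.pyGet? tree s).getD []) i 0, s, 0, ([] : List Int))
          :: (s, e, i + 1, tmp) :: rest, values) := by
  simp [stepB, h0, hlt, hne]

theorem pv_stepB_skip (tree : List (List Int)) (s e i : Int) (tmp : List Int)
    (rest : List (Int × Int × Int × List Int)) (values : List Int)
    (h0 : ¬ i = 0) (hlt : i < (((PySem.List.pyGet? tree s).getD []).length : Int))
    (heq : PySem.List.pyGetD ((PySem.List.pyGet? tree s).getD []) i 0 = e) :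
    stepB tree ((s, e, i, tmp) :: rest, values)
      = ((s, e, i + 1, tmp) :: rest, values) := by
  simp [stepB, h0, hlt, heq]

theorem pv_stepB_exit (tree : List (List Int)) (s e i : Int) (tmp : List Int)
    (rest : List (Int × Int × Int × List Int)) (values : List Int)
    (h0 : ¬ i = 0) (hge : ¬ i < (((PySem.List.pyGet? tree s).getD []).length : Int)) :
    stepB tree ((s, e, i, tmp) :: rest, values)
      = (pvPush ((PySem.List.pyGet? (pvExitVals s values tmp) s).getD 0) rest,
         pvExitVals s values tmp) := by
  cases rest with
  | nil => simp [stepB, h0, hge, pvPush, pvExitVals]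
  | cons f r => obtain ⟨s2, e2, i2, t2⟩ := f; simp [stepB, h0, hge, pvPush, pvExitVals]

-- entry step (i = 0): writes values[s] = 1 and processes child index 0 (or exits on an empty row)
theorem pv_stepB_entry_push (tree : List (List Int)) (s e : Int) (tmp : List Int)
    (rest : List (Int × Int × Int × List Int)) (values : List Int)
    (hlt : (0 : Int) < (((PySem.List.pyGet? tree s).getD []).length : Int))
    (hne : ¬ PySem.List.pyGetD ((PySem.List.pyGet? tree s).getD []) 0 0 = e) :
    stepB tree ((s, e, 0, tmp) :: rest, values)
      = ((PySem.List.pyGetD ((PySem.List.pyGet? tree s).getD []) 0 0, s, 0, ([] : List Int))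
          :: (s, e, 1, tmp) :: rest, PySem.List.pySetD values s 1) := by
  have hnil : (PySem.List.pyGet? tree s).getD [] ≠ [] := by
    intro h; rw [h] at hlt; simp at hlt
  simp [stepB, hlt, hne, hnil]

theorem pv_stepB_entry_skip (tree : List (List Int)) (s e : Int) (tmp : List Int)
    (rest : List (Int × Int × Int × List Int)) (values : List Int)
    (hlt : (0 : Int) < (((PySem.List.pyGet? tree s).getD []).length : Int))
    (heq : PySem.List.pyGetD ((PySem.List.pyGet? tree s).getD []) 0 0 = e) :
    stepB tree ((s, e, 0, tmp) :: rest, values)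
      = ((s, e, 1, tmp) :: rest, PySem.List.pySetD values s 1) := by
  have hnil : (PySem.List.pyGet? tree s).getD [] ≠ [] := by
    intro h; rw [h] at hlt; simp at hlt
  simp [stepB, hlt, heq, hnil]

theorem pv_stepB_entry_exit (tree : List (List Int)) (s e : Int) (tmp : List Int)
    (rest : List (Int × Int × Int × List Int)) (values : List Int)
    (hge : ¬ (0 : Int) < (((PySem.List.pyGet? tree s).getD []).length : Int)) :
    stepB tree ((s, e, 0, tmp) :: rest, values)
      = (pvPush ((PySem.List.pyGet? (pvExitVals s (PySem.List.pySetD values s 1) tmp) s).getD 0) rest,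
         pvExitVals s (PySem.List.pySetD values s 1) tmp) := by
  have hn : ¬ 0 < ((PySem.List.pyGet? tree s).getD []).length := by exact_mod_cast hge
  cases rest with
  | nil => simp [stepB, hge, hn, pvPush, pvExitVals]
  | cons f r => obtain ⟨s2, e2, i2, t2⟩ := f; simp [stepB, hge, hn, pvPush, pvExitVals]

-- the simulation: B's machine, run for exactly the steps of the call dfs(s, e), performs A's call
theorem pv_sim (tree : List (List Int)) (hT : pvTreeOKb tree = true) :
    ∀ (f : Nat) (s e : Int) (d : Nat), pvCallOK tree s e d →
    (if e = s then 2 * tree.length + 1 else 2 * tree.length + 2) ≤ f + 2 * d →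
    ∀ (values : List Int) (rest : List (Int × Int × Int × List Int)),
      runB tree (pvStepsA tree (f + 1) s e) ((s, e, 0, ([] : List Int)) :: rest, values)
        = (pvPush ((PySem.List.pyGet? (dfsA tree (f + 1) s e values) s).getD 0) rest,
           dfsA tree (f + 1) s e values) := by
  intro f
  induction f using Nat.strong_induction_on with
  | _ f IH =>
  intro s e d hc hfd values rest
  have hrowmem := pv_callStep tree hT s e d hc
  set row := (PySem.List.pyGet? tree s).getD [] with hrowdef
  have hsd : pvDist tree s.toNat = some d := hc.2.2.1
  have hdleM : d ≤ tree.length := pv_dist_le tree s.toNat d hsd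
  have hf1 : 1 ≤ f := by
    rcases eq_or_ne e s with h | h
    · rw [if_pos h] at hfd; omega
    · rw [if_neg h] at hfd; omega
  have hfd' : 2 * tree.length + 1 ≤ f + 2 * d := by
    rcases eq_or_ne e s with h | h
    · rw [if_pos h] at hfd; omega
    · rw [if_neg h] at hfd; omega
  have hchild : ∀ u, u ∈ row → ¬ u = e → ∃ dc, pvCallOK tree u s dc ∧
      (if s = u then 2 * tree.length + 1 else 2 * tree.length + 2) ≤ (f - 1) + 2 * dc := by
    intro u hu hne
    rcases hrowmem u hu with h | ⟨hus, hok⟩ | hok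
    · exact absurd h hne
    · refine ⟨d, by rw [hus]; exact hok, ?_⟩
      have hes : ¬ e = s := fun h => hne (by rw [hus, ← h])
      rw [if_pos hus.symm]
      rw [if_neg hes] at hfd
      omega
    · refine ⟨d + 1, hok, ?_⟩
      have hsu : ¬ s = u := by
        intro h
        have h2 := hok.2.2.1
        rw [← h, hsd] at h2
        simp only [Option.some.injEq] at h2
        omega
      rw [if_neg hsu]
      omega
  have hsteps : pvStepsA tree (f + 1) s e
      = 1 + row.foldl (fun acc u => acc + 1 + (if u = e then 0 else pvStepsA tree f u s)) 0 := rfl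
  -- the inner loop: from child index i ≥ 1 with collected values tmp, the machine finishes the frame
  have inner : ∀ (l : List Int), (∀ u ∈ l, u ∈ row) → ∀ (i : Nat), 1 ≤ i →
      i + l.length = row.length → row.drop i = l →
      ∀ (tmp vals : List Int) (rest' : List (Int × Int × Int × List Int)),
      runB tree (1 + l.foldl (fun acc u => acc + 1 + (if u = e then 0 else pvStepsA tree f u s)) 0)
          ((s, e, (i : Int), tmp) :: rest', vals)
        = (pvPush ((PySem.List.pyGet? (pvExitVals s (l.foldl (pvF tree f s e) (vals, tmp)).1
              (l.foldl (pvF tree f s e) (vals, tmp)).2) s).getD 0) rest',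
           pvExitVals s (l.foldl (pvF tree f s e) (vals, tmp)).1
             (l.foldl (pvF tree f s e) (vals, tmp)).2) := by
    intro l
    induction l with
    | nil =>
      intro _ i hi hlen hdrop tmp vals rest'
      simp only [List.foldl_nil, Nat.add_zero]
      have h0 : ¬ (i : Int) = 0 := by
        simp only [Int.natCast_eq_zero]
        omega
      have hge : ¬ (i : Int) < (row.length : Int) := by
        simp only [List.length_nil, Nat.add_zero] at hlen
        omega
      have h1 : runB tree 1 ((s, e, (i : Int), tmp) :: rest', vals)
          = stepB tree ((s, e, (i : Int), tmp) :: rest', vals) := rfl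
      rw [h1, pv_stepB_exit tree s e (i : Int) tmp rest' vals h0 hge]
    | cons u l' ihl =>
      intro hsub i hi hlen hdrop tmp vals rest'
      have husub : u ∈ row := hsub u List.mem_cons_self
      have hl'sub : ∀ w ∈ l', w ∈ row := fun w hw => hsub w (List.mem_cons_of_mem _ hw)
      have hilt : i < row.length := by
        simp only [List.length_cons] at hlen
        omega
      have hu_get : row[i]? = some u := by
        have h2 : (row.drop i)[0]? = row[i + 0]? := List.getElem?_drop
        rw [hdrop] at h2
        simpa using h2.symm
      have hu_val : PySem.List.pyGetD row (i : Int) 0 = u := by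
        rw [PySem.List.pyGetD_natCast, List.getD_eq_getElem?_getD, hu_get]
        rfl
      have hdrop' : row.drop (i + 1) = l' := by
        rw [← List.drop_drop, hdrop]
        rfl
      have h0 : ¬ (i : Int) = 0 := by
        simp only [Int.natCast_eq_zero]
        omega
      have hltI : (i : Int) < (row.length : Int) := by exact_mod_cast hilt
      have hcast1 : (i : Int) + 1 = ((i + 1 : Nat) : Int) := by push_cast; ring
      have hlen' : (i + 1) + l'.length = row.length := by
        simp only [List.length_cons] at hlen
        omega
      by_cases hue : u = e
      · have hcnt : 1 + (u :: l').foldl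
              (fun acc u => acc + 1 + (if u = e then 0 else pvStepsA tree f u s)) 0
            = (1 + l'.foldl
                (fun acc u => acc + 1 + (if u = e then 0 else pvStepsA tree f u s)) 0) + 1 := by
          rw [List.foldl_cons,
            pv_foldl_shift (fun u => if u = e then 0 else pvStepsA tree f u s) l']
          simp [hue]
          omega
        rw [hcnt, pv_runB_succ_cons,
          pv_stepB_skip tree s e (i : Int) tmp rest' vals h0 hltI (by rw [hu_val]; exact hue),
          hcast1]
        have hrec := ihl hl'sub (i + 1) (by omega) hlen' hdrop' tmp vals rest'
        rw [List.foldl_cons, show pvF tree f s e (vals, tmp) u = (vals, tmp) by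
          simp [pvF, hue]]
        exact hrec
      · obtain ⟨dc, hcOK, hfc⟩ := hchild u husub hue
        obtain ⟨g, hg⟩ : ∃ g, f = g + 1 := ⟨f - 1, by omega⟩
        subst hg
        rw [show g + 1 - 1 = g from rfl] at hfc
        have hcnt : 1 + (u :: l').foldl
              (fun acc u => acc + 1 + (if u = e then 0 else pvStepsA tree (g + 1) u s)) 0
            = (pvStepsA tree (g + 1) u s + (1 + l'.foldl
                (fun acc u => acc + 1 + (if u = e then 0 else pvStepsA tree (g + 1) u s)) 0)) + 1 := by
          rw [List.foldl_cons,
            pv_foldl_shift (fun u => if u = e then 0 else pvStepsA tree (g + 1) u s) l']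
          simp [hue]
          omega
        rw [hcnt, pv_runB_succ_cons,
          pv_stepB_push tree s e (i : Int) tmp rest' vals h0 hltI (by rw [hu_val]; exact hue),
          hu_val, hcast1, pv_runB_add]
        have hIH := IH g (by omega) u s dc hcOK hfc vals
          ((s, e, ((i + 1 : Nat) : Int), tmp) :: rest')
        rw [hIH, show pvPush ((PySem.List.pyGet? (dfsA tree (g + 1) u s vals) u).getD 0)
            ((s, e, ((i + 1 : Nat) : Int), tmp) :: rest')
          = (s, e, ((i + 1 : Nat) : Int),
             tmp ++ [(PySem.List.pyGet? (dfsA tree (g + 1) u s vals) u).getD 0]) :: rest' from rfl]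
        have hrec := ihl hl'sub (i + 1) (by omega) hlen' hdrop'
          (tmp ++ [(PySem.List.pyGet? (dfsA tree (g + 1) u s vals) u).getD 0])
          (dfsA tree (g + 1) u s vals) rest'
        rw [List.foldl_cons, show pvF tree (g + 1) s e (vals, tmp) u
            = (dfsA tree (g + 1) u s vals,
               tmp ++ [(PySem.List.pyGet? (dfsA tree (g + 1) u s vals) u).getD 0]) by
          simp [pvF, hue]]
        exact hrec
  -- the main frame: entry step at i = 0, then the inner loop
  rw [pv_dfsA_succ tree f s e values, ← hrowdef]
  cases hrow2 : row with
  | nil =>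
    have hge : ¬ (0 : Int) < (row.length : Int) := by
      rw [hrow2]
      simp
    have h1 : pvStepsA tree (f + 1) s e = 1 := by
      rw [hsteps, hrow2]
      rfl
    rw [h1, show runB tree 1 ((s, e, (0 : Int), ([] : List Int)) :: rest, values)
        = stepB tree ((s, e, (0 : Int), ([] : List Int)) :: rest, values) from rfl,
      pv_stepB_entry_exit tree s e [] rest values hge]
    simp only [List.foldl_nil]
  | cons u0 l0 =>
    have hlt0 : (0 : Int) < (row.length : Int) := by
      rw [hrow2]
      simp only [List.length_cons]
      exact_mod_cast Nat.succ_pos l0.length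
    have hu0val : PySem.List.pyGetD row 0 0 = u0 := by
      rw [hrow2]
      exact PySem.List.pyGetD_zero_cons u0 l0 0
    have hu0mem : u0 ∈ row := by
      rw [hrow2]
      exact List.mem_cons_self
    have hdrop1 : row.drop 1 = l0 := by
      rw [hrow2]
      rfl
    have hlen1 : 1 + l0.length = row.length := by
      rw [hrow2]
      simp [List.length_cons]
      omega
    by_cases hue : u0 = e
    · have hcnt : pvStepsA tree (f + 1) s e
          = (1 + l0.foldl
              (fun acc u => acc + 1 + (if u = e then 0 else pvStepsA tree f u s)) 0) + 1 := by
        rw [hsteps, hrow2, List.foldl_cons,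
          pv_foldl_shift (fun u => if u = e then 0 else pvStepsA tree f u s) l0]
        simp [hue]
        omega
      rw [hcnt, pv_runB_succ_cons,
        pv_stepB_entry_skip tree s e [] rest values hlt0 (by rw [hu0val]; exact hue)]
      have hrec := inner l0 (fun w hw => by rw [hrow2]; exact List.mem_cons_of_mem _ hw)
        1 le_rfl hlen1 hdrop1 [] (PySem.List.pySetD values s 1) rest
      simp only [Nat.cast_one] at hrec
      rw [List.foldl_cons, show pvF tree f s e (PySem.List.pySetD values s 1, []) u0
          = (PySem.List.pySetD values s 1, ([] : List Int)) by simp [pvF, hue]]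
      exact hrec
    · obtain ⟨dc, hcOK, hfc⟩ := hchild u0 hu0mem hue
      obtain ⟨g, hg⟩ : ∃ g, f = g + 1 := ⟨f - 1, by omega⟩
      subst hg
      rw [show g + 1 - 1 = g from rfl] at hfc
      have hcnt : pvStepsA tree (g + 1 + 1) s e
          = (pvStepsA tree (g + 1) u0 s + (1 + l0.foldl
              (fun acc u => acc + 1 + (if u = e then 0 else pvStepsA tree (g + 1) u s)) 0)) + 1 := by
        rw [hsteps, hrow2, List.foldl_cons,
          pv_foldl_shift (fun u => if u = e then 0 else pvStepsA tree (g + 1) u s) l0]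
        simp [hue]
        omega
      rw [hcnt, pv_runB_succ_cons,
        pv_stepB_entry_push tree s e [] rest values hlt0 (by rw [hu0val]; exact hue),
        hu0val, pv_runB_add]
      have hIH := IH g (by omega) u0 s dc hcOK hfc (PySem.List.pySetD values s 1)
        ((s, e, (1 : Int), ([] : List Int)) :: rest)
      rw [hIH, show pvPush ((PySem.List.pyGet? (dfsA tree (g + 1) u0 s
            (PySem.List.pySetD values s 1)) u0).getD 0)
          ((s, e, (1 : Int), ([] : List Int)) :: rest)
        = (s, e, (1 : Int),
           [(PySem.List.pyGet? (dfsA tree (g + 1) u0 s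
              (PySem.List.pySetD values s 1)) u0).getD 0]) :: rest from rfl]
      have hrec := inner l0 (fun w hw => by rw [hrow2]; exact List.mem_cons_of_mem _ hw)
        1 le_rfl hlen1 hdrop1
        [(PySem.List.pyGet? (dfsA tree (g + 1) u0 s (PySem.List.pySetD values s 1)) u0).getD 0]
        (dfsA tree (g + 1) u0 s (PySem.List.pySetD values s 1)) rest
      simp only [Nat.cast_one] at hrec
      rw [List.foldl_cons, show pvF tree (g + 1) s e (PySem.List.pySetD values s 1, []) u0
          = (dfsA tree (g + 1) u0 s (PySem.List.pySetD values s 1),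
             [(PySem.List.pyGet? (dfsA tree (g + 1) u0 s
                (PySem.List.pySetD values s 1)) u0).getD 0]) by simp [pvF, hue]]
      exact hrec

-- ===== VERDICT (by name: the statement is the Claim_ definition above) =====
theorem solve_spec : Claim_equal_solve := by
  intro tree n x _ hpre
  obtain ⟨hlen, hT, hn⟩ := hpre
  show solve tree n x = solve_alt tree n x
  simp only [solve, solve_alt]
  have hc : pvCallOK tree 0 (-1) 0 := by
    refine ⟨le_refl 0, by exact_mod_cast hlen, ?_, Or.inr (Or.inl ⟨rfl, rfl⟩)⟩
    exact pv_dist_zero tree hlen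
  have hsim := pv_sim tree hT (2 * tree.length + 2) 0 (-1) 0 hc
    (by rw [if_neg (by norm_num : ¬ (-1 : Int) = (0 : Int))])
    (List.replicate n.toNat (0 : Int)) []
  rw [show 2 * tree.length + 3 = (2 * tree.length + 2) + 1 from rfl]
  have hle : pvStepsA tree ((2 * tree.length + 2) + 1) 0 (-1) ≤ pvFuelB tree := by
    have h1 := pv_steps_le tree ((2 * tree.length + 2) + 1) 0 (-1)
    rw [show (2 * tree.length + 2) + 1 + 1 = 2 * tree.length + 4 by omega] at h1
    rw [pvFuelB]
    omega
  obtain ⟨k, hk⟩ : ∃ k, pvFuelB tree = pvStepsA tree ((2 * tree.length + 2) + 1) 0 (-1) + k :=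
    ⟨pvFuelB tree - pvStepsA tree ((2 * tree.length + 2) + 1) 0 (-1), by omega⟩
  rw [hk, pv_runB_add, hsim]
  rw [show pvPush ((PySem.List.pyGet? (dfsA tree ((2 * tree.length + 2) + 1) 0 (-1)
      (List.replicate n.toNat (0 : Int))) 0).getD 0) [] = [] from rfl]
  rw [pv_runB_nil]
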